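-- pv_equiv track=rewrite | github.com/zingozingo/form_helper_v2 | backend/core/ai/form_context_analyzer.py | _analyze_field_relationships
-- ===== SOURCE A (Python) =====
-- from typing import Dict, List, Any, Optional, Tuple
--
-- def _analyze_field_relationships(fields: List[Dict[str, Any]]) -> Dict[str, List[Dict[str, str]]]:
--     """
--     Analyze relationships between fields.
--
--     Args:
--         fields: List of field dictionaries
--
--     Returns:
--         Dictionary of field relationships
--     """
--     relationships = {}
--
--     # Get field names
--     field_names = [f.get("name", "") for f in fields]
--
--     # Define common field relationships
--     related_pairs = [
--         ("first_name", "last_name", "Personal name components"),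
--         ("email", "confirm_email", "Email verification pair"),
--         ("password", "confirm_password", "Password verification pair"),
--         ("address", "city", "Address components"),
--         ("city", "state", "Geographic location components"),
--         ("state", "zip", "Geographic location components"),
--         ("country", "zip", "Geographic location components"),
--         ("credit_card", "cvv", "Payment security components"),
--         ("credit_card", "expiration", "Payment components")
--     ]
--
--     # Look for pattern-based relationships
--     for name1 in field_names:
--         relationships[name1] = []
--
--         # Check name-based relationships
--         for prefix1, prefix2, rel_type in related_pairs:
--             if prefix1 in name1.lower():
--                 for name2 in field_names:
--                     if name2 != name1 and prefix2 in name2.lower():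
--                         relationships[name1].append({
--                             "field": name2,
--                             "relationship_type": rel_type
--                         })
--
--         # Check for complementary fields (fields that go together)
--         common_prefixes = {
--             "billing_": "shipping_",
--             "shipping_": "billing_",
--             "current_": "new_",
--             "new_": "current_"
--         }
--
--         for prefix, complement in common_prefixes.items():
--             if name1.lower().startswith(prefix):
--                 base_name = name1[len(prefix):]
--                 complement_name = f"{complement}{base_name}"
--                 if complement_name in field_names:
--                     relationships[name1].append({
--                         "field": complement_name,
--                         "relationship_type": "Complementary information"
--                     })
--
--     return relationships
-- ===== SOURCE B (Python) =====
-- from typing import Dict, List, Any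
--
-- RELATED_PAIRS = [
--     ("first_name", "last_name", "Personal name components"),
--     ("email", "confirm_email", "Email verification pair"),
--     ("password", "confirm_password", "Password verification pair"),
--     ("address", "city", "Address components"),
--     ("city", "state", "Geographic location components"),
--     ("state", "zip", "Geographic location components"),
--     ("country", "zip", "Geographic location components"),
--     ("credit_card", "cvv", "Payment security components"),
--     ("credit_card", "expiration", "Payment components"),
-- ]
--
-- COMMON_PREFIXES = {
--     "billing_": "shipping_",
--     "shipping_": "billing_",
--     "current_": "new_",
--     "new_": "current_",
-- }
--
--
-- def _analyze_field_relationships(fields: List[Dict[str, Any]]) -> Dict[str, List[Dict[str, str]]]: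
--     field_names = [f.get("name", "") for f in fields]
--
--     # Per-pair candidate index, computed once: names containing the pair's target.
--     pair_matches = [
--         (p1, rel, [n for n in field_names if p2 in n.lower()])
--         for p1, p2, rel in RELATED_PAIRS
--     ]
--     name_set = set(field_names)
--
--     # A re-inserts the identical entry list for duplicate names, so the result
--     # is one entry per distinct name, in first-occurrence order.
--     return {
--         name1: _entries_for(name1, pair_matches, name_set)
--         for name1 in dict.fromkeys(field_names)
--     }
--
--
-- def _entries_for(name1, pair_matches, name_set):
--     low = name1.lower()
--     pair_entries = [
--         {"field": n, "relationship_type": rel}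
--         for p1, rel, candidates in pair_matches
--         if p1 in low
--         for n in candidates
--         if n != name1
--     ]
--     comp_entries = [
--         {"field": complement + name1[len(prefix):],
--          "relationship_type": "Complementary information"}
--         for prefix, complement in COMMON_PREFIXES.items()
--         if low.startswith(prefix) and (complement + name1[len(prefix):]) in name_set
--     ]
--     return pair_entries + comp_entries
-- ===== Notes on version B (the rewrite author's own statement) =====
-- stated objective: alternative
-- what changed: B drops A's dict-building loop entirely: it dedups the field names once (dict.fromkeys), precomputes per-pair candidate lists so the per-field inner rescan of all names disappears, and builds the result as a single dict comprehension of entry lists assembled by list comprehensions; duplicate names, for which A recomputes and overwrites identical values, are computed once.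
import Mathlib
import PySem

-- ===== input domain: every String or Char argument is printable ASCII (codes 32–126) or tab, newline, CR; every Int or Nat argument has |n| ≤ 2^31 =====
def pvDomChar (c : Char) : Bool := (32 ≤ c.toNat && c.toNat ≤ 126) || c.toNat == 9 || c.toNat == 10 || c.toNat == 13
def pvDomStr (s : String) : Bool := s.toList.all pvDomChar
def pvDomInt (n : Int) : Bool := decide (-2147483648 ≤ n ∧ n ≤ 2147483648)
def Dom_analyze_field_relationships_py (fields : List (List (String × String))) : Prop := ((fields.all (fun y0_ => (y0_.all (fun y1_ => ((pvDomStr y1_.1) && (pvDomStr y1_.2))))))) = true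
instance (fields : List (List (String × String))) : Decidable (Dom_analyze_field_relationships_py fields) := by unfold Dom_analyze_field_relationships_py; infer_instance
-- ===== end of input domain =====

-- B replaces A's dict-building loop by a map over the deduplicated name list, with a
-- per-pair precomputed candidate index and comprehension-style entry construction
-- (return value only; neither program mutates its argument).

-- shared literal tables and the entry-dict constructor
def pvRelatedPairs : List (String × String × String) :=
  [("first_name", "last_name", "Personal name components"),
   ("email", "confirm_email", "Email verification pair"),
   ("password", "confirm_password", "Password verification pair"),
   ("address", "city", "Address components"),
   ("city", "state", "Geographic location components"),
   ("state", "zip", "Geographic location components"),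
   ("country", "zip", "Geographic location components"),
   ("credit_card", "cvv", "Payment security components"),
   ("credit_card", "expiration", "Payment components")]

def pvCommonPrefixes : List (String × String) :=
  [("billing_", "shipping_"), ("shipping_", "billing_"),
   ("current_", "new_"), ("new_", "current_")]

def pvEntry (n rel : String) : List (String × String) :=
  [("field", n), ("relationship_type", rel)]

-- ===== PORT A =====
def analyze_field_relationships_py (fields : List (List (String × String))) : List (String × List (List (String × String))) :=
  let field_names := fields.map (fun f => (PySem.Dict.mk f).getD "name" "")
  (field_names.foldl (fun (d : PySem.Dict String (List (List (String × String)))) name1 =>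
    -- relationships[name1] = [] ; then the two append loops
    let rel1 := pvRelatedPairs.foldl (fun acc p =>
      if PySem.Str.isIn p.1 (PySem.Str.lower name1) then
        acc ++ field_names.foldl (fun acc2 name2 =>
          if name2 != name1 && PySem.Str.isIn p.2.1 (PySem.Str.lower name2) then
            acc2 ++ [pvEntry name2 p.2.2]
          else acc2) []
      else acc) []
    let rel2 := pvCommonPrefixes.foldl (fun acc pc =>
      if PySem.Str.startswith (PySem.Str.lower name1) pc.1 then
        let complement_name := pc.2 ++ PySem.Str.slice name1 (some (PySem.Str.len pc.1)) none
        if complement_name ∈ field_names then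
          acc ++ [pvEntry complement_name "Complementary information"]
        else acc
      else acc) rel1
    d.insert name1 rel2) PySem.Dict.empty).items

-- ===== PORT B =====
-- _entries_for(name1, pair_matches, name_set): two comprehensions, concatenated
def pvEntriesFor (name1 : String) (pair_matches : List (String × String × List String))
    (name_set : PySem.Set String) : List (List (String × String)) :=
  let low := PySem.Str.lower name1
  let pair_entries := pair_matches.flatMap (fun pm =>
    if PySem.Str.isIn pm.1 low then
      (pm.2.2.filter (fun n => n != name1)).map (fun n => pvEntry n pm.2.1)
    else [])
  let comp_entries := (pvCommonPrefixes.filter (fun pc =>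
      PySem.Str.startswith low pc.1 &&
      PySem.Set.contains name_set (pc.2 ++ PySem.Str.slice name1 (some (PySem.Str.len pc.1)) none))).map
    (fun pc => pvEntry (pc.2 ++ PySem.Str.slice name1 (some (PySem.Str.len pc.1)) none) "Complementary information")
  pair_entries ++ comp_entries

def analyze_field_relationships_py_alt (fields : List (List (String × String))) : List (String × List (List (String × String))) :=
  let field_names := fields.map (fun f => (PySem.Dict.mk f).getD "name" "")
  let pair_matches := pvRelatedPairs.map (fun p =>
    (p.1, p.2.2, field_names.filter (fun n => PySem.Str.isIn p.2.1 (PySem.Str.lower n))))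
  let name_set := PySem.Set.ofList field_names
  (PySem.List.dedup field_names).map (fun name1 => (name1, pvEntriesFor name1 pair_matches name_set))

-- ===== PRECONDITION & SPEC =====
def Spec_analyze_field_relationships_py (fields : List (List (String × String))) (out : List (String × List (List (String × String)))) : Prop := out = analyze_field_relationships_py_alt fields
instance (fields : List (List (String × String))) (out : List (String × List (List (String × String)))) : Decidable (Spec_analyze_field_relationships_py fields out) := by unfold Spec_analyze_field_relationships_py; infer_instance

-- ===== CLAIM (what is proved, stated in full; the proofs are below) =====
def Claim_equal_analyze_field_relationships_py : Prop := ∀ (fields : List (List (String × String))), Dom_analyze_field_relationships_py fields → Spec_analyze_field_relationships_py fields (analyze_field_relationships_py fields)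

-- ===== LEMMAS AND PROOFS =====

-- lookups in an insert loop whose values depend only on the key
theorem pv_getD_foldl_notmem {ν : Type} (xs : List String) (v : String → ν)
    (d : PySem.Dict String ν) (x : String) (hx : x ∉ xs) (dflt : ν) :
    (xs.foldl (fun d y => d.insert y (v y)) d).getD x dflt = d.getD x dflt := by
  induction xs generalizing d with
  | nil => rfl
  | cons h t ih =>
    simp only [List.foldl_cons]
    rw [ih _ (by simp_all), PySem.Dict.getD_insert_of_ne]
    intro he; exact hx (he ▸ List.mem_cons_self)

theorem pv_getD_foldl_mem {ν : Type} (xs : List String) (v : String → ν)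
    (d : PySem.Dict String ν) (x : String) (hx : x ∈ xs) (dflt : ν) :
    (xs.foldl (fun d y => d.insert y (v y)) d).getD x dflt = v x := by
  induction xs generalizing d with
  | nil => cases hx
  | cons h t ih =>
    simp only [List.foldl_cons]
    by_cases hm : x ∈ t
    · exact ih _ hm
    · have hxh : x = h := by cases hx with | head => rfl | tail _ h' => exact absurd h' hm
      rw [pv_getD_foldl_notmem t v _ x hm, hxh, PySem.Dict.getD_insert_self]

-- the items of A's insert loop are the deduped keys paired with their (key-only) values
theorem pv_items_foldl {ν : Type} [Inhabited ν] (xs : List String) (v : String → ν) :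
    ((xs.foldl (fun d y => d.insert y (v y)) PySem.Dict.empty).items)
      = (PySem.List.dedup xs).map (fun x => (x, v x)) := by
  have hk : (xs.foldl (fun d y => d.insert y (v y)) PySem.Dict.empty).keys
      = PySem.List.dedup xs := by
    rw [PySem.Dict.keys_foldl_insert xs (fun _ y => v y) PySem.Dict.empty,
      PySem.List.dedup_eq_ofList]
    rfl
  have hnd : (xs.foldl (fun d y => d.insert y (v y)) PySem.Dict.empty).keys.Nodup :=
    PySem.Dict.nodup_keys_foldl_insert xs (fun _ y => v y) PySem.Dict.empty
      PySem.Dict.nodup_keys_empty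
  rw [PySem.Dict.items_eq_map_keys _ hnd default, hk]
  apply List.map_congr_left
  intro k hkmem
  have : k ∈ xs := (PySem.List.mem_dedup xs k).1 hkmem
  rw [pv_getD_foldl_mem xs v _ k this]

-- A's per-name entry list equals B's _entries_for over the precomputed index
theorem pv_value (names : List String) (name1 : String) :
    List.foldl
      (fun acc pc =>
        if PySem.Str.startswith (PySem.Str.lower name1) pc.1 then
          if (pc.2 ++ PySem.Str.slice name1 (some (PySem.Str.len pc.1)) none) ∈ names then
            acc ++ [pvEntry (pc.2 ++ PySem.Str.slice name1 (some (PySem.Str.len pc.1)) none) "Complementary information"]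
          else acc
        else acc)
      (List.foldl
        (fun acc p =>
          if PySem.Str.isIn p.1 (PySem.Str.lower name1) then
            acc ++ List.foldl
              (fun acc2 name2 =>
                if name2 != name1 && PySem.Str.isIn p.2.1 (PySem.Str.lower name2) then
                  acc2 ++ [pvEntry name2 p.2.2]
                else acc2) [] names
          else acc)
        [] pvRelatedPairs)
      pvCommonPrefixes
    = pvEntriesFor name1
        (pvRelatedPairs.map (fun p =>
          (p.1, p.2.2, names.filter (fun n => PySem.Str.isIn p.2.1 (PySem.Str.lower n)))))
        (PySem.Set.ofList names) := by
  unfold pvEntriesFor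
  -- inner rescan → filter+map; outer pair loop → flatMap
  have h1 : List.foldl
        (fun acc p =>
          if PySem.Str.isIn p.1 (PySem.Str.lower name1) then
            acc ++ List.foldl
              (fun acc2 name2 =>
                if name2 != name1 && PySem.Str.isIn p.2.1 (PySem.Str.lower name2) then
                  acc2 ++ [pvEntry name2 p.2.2]
                else acc2) [] names
          else acc)
        ([] : List (List (String × String))) pvRelatedPairs
      = (pvRelatedPairs.map (fun p =>
          (p.1, p.2.2, names.filter (fun n => PySem.Str.isIn p.2.1 (PySem.Str.lower n))))).flatMap
          (fun pm =>
            if PySem.Str.isIn pm.1 (PySem.Str.lower name1) then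
              (pm.2.2.filter (fun n => n != name1)).map (fun n => pvEntry n pm.2.1)
            else []) := by
    rw [List.flatMap_map]
    have hbody : ∀ (acc : List (List (String × String))), ∀ p ∈ pvRelatedPairs,
        (if PySem.Str.isIn p.1 (PySem.Str.lower name1) then
            acc ++ List.foldl
              (fun acc2 name2 =>
                if name2 != name1 && PySem.Str.isIn p.2.1 (PySem.Str.lower name2) then
                  acc2 ++ [pvEntry name2 p.2.2]
                else acc2) [] names
          else acc)
        = acc ++ (if PySem.Str.isIn p.1 (PySem.Str.lower name1) then
            ((names.filter (fun n => PySem.Str.isIn p.2.1 (PySem.Str.lower n))).filter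
              (fun n => n != name1)).map (fun n => pvEntry n p.2.2)
          else []) := by
      intro acc p _
      rw [PySem.List.foldl_append_if
        (fun name2 => name2 != name1 && PySem.Str.isIn p.2.1 (PySem.Str.lower name2))
        (fun name2 => pvEntry name2 p.2.2) names []]
      rw [List.filter_filter]
      split <;> simp
    rw [PySem.List.foldl_congr_mem _ _ _ _ hbody,
      PySem.List.foldl_append_eq_flatMap, List.nil_append]
  rw [h1]
  -- prefix loop → filter+map appended to the pair entries
  have hbody2 : ∀ (acc : List (List (String × String))), ∀ pc ∈ pvCommonPrefixes,
      (if PySem.Str.startswith (PySem.Str.lower name1) pc.1 then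
          if (pc.2 ++ PySem.Str.slice name1 (some (PySem.Str.len pc.1)) none) ∈ names then
            acc ++ [pvEntry (pc.2 ++ PySem.Str.slice name1 (some (PySem.Str.len pc.1)) none) "Complementary information"]
          else acc
        else acc)
      = (if (PySem.Str.startswith (PySem.Str.lower name1) pc.1 &&
            PySem.Set.contains (PySem.Set.ofList names)
              (pc.2 ++ PySem.Str.slice name1 (some (PySem.Str.len pc.1)) none)) then
          acc ++ [pvEntry (pc.2 ++ PySem.Str.slice name1 (some (PySem.Str.len pc.1)) none) "Complementary information"]
        else acc) := by
    intro acc pc _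
    have hc : PySem.Set.contains (PySem.Set.ofList names)
        (pc.2 ++ PySem.Str.slice name1 (some (PySem.Str.len pc.1)) none)
        = decide ((pc.2 ++ PySem.Str.slice name1 (some (PySem.Str.len pc.1)) none) ∈ names) := by
      simp [PySem.Set.contains, PySem.Set.mem_ofList]
    rw [hc]
    split_ifs with h1 h2 h3 h4 <;> simp_all
  rw [PySem.List.foldl_congr_mem _ _ _ _ hbody2,
    PySem.List.foldl_append_if
      (fun pc => PySem.Str.startswith (PySem.Str.lower name1) pc.1 &&
        PySem.Set.contains (PySem.Set.ofList names)
          (pc.2 ++ PySem.Str.slice name1 (some (PySem.Str.len pc.1)) none))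
      (fun pc => pvEntry (pc.2 ++ PySem.Str.slice name1 (some (PySem.Str.len pc.1)) none) "Complementary information")
      pvCommonPrefixes]

-- ===== VERDICT (by name: the statement is the Claim_ definition above) =====
set_option maxHeartbeats 1000000 in
theorem analyze_field_relationships_py_spec : Claim_equal_analyze_field_relationships_py := by
  intro fields _
  unfold Spec_analyze_field_relationships_py
  simp only [analyze_field_relationships_py, analyze_field_relationships_py_alt]
  rw [pv_items_foldl]
  apply List.map_congr_left
  intro name1 _
  rw [pv_value (fields.map (fun f => (PySem.Dict.mk f).getD "name" "")) name1]
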